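-- pv_equiv track=rewrite | github.com/vejvarm/CodeWars | 5kyu_Double_Cola/main.py | whoIsNext
-- ===== SOURCE A (Python) =====
-- def whoIsNext(names, r):
--     # the amount of every person and the length of the list after running through it once is doubled
--     # we are looking for a number len(names)*(2**0 + 2**1 + 2**2 + ... + 2**mul) + residue == r
--     # that means we have a geometric sequence with a quotient of q = 2 and we are looking for the last sum of first n
--     # elements which is less than or equal to r
--     name_dict = dict(enumerate(names, 0))
--     reverse_dict = {v: k for k, v in name_dict.items()}
--     queue = [reverse_dict[name] for name in names]
--
--     a = len(queue)  # initial length of the list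
--     q = 2  # quotient
--     mul = 0  # initial multiplier
--     seq_sum = 0  # the sum of the geometric sequence
--
--     while seq_sum <= r:
--         mul += 1
--         seq_sum = a * (q ** mul - 1) // (q - 1)
--
--     # correct the multiplier and subtract last element of the sequence so that seq_sum is smaller than r
--     mul -= 1
--     seq_sum -= a * q ** mul
--     residue = r - seq_sum - 1
--
--     # return the person which is going to be at the beginning
--     return name_dict[residue // 2 ** mul]
-- ===== SOURCE B (Python) =====
-- def whoIsNext(names, r):
--     # closed form: seats before round m total n*(2**m - 1); with q = (r-1)//n the
--     # round index is m = (q+1).bit_length() - 1, and the drinker sits at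
--     # (offset within the round) // 2**m.
--     n = len(names)
--     m = ((r - 1) // n + 1).bit_length() - 1
--     return names[(r - 1 - n * (2**m - 1)) // 2**m]
-- ===== Notes on version B (the rewrite author's own statement) =====
-- stated objective: faster
-- what changed: B replaces A's search loop and its two dict/queue passes over names with a loop-free closed form: the round index is computed directly as ((r-1)//n + 1).bit_length() - 1 and the answer is a single list indexing.
-- outside the precondition, e.g. on whoIsNext(['a', 'b', 'c', 'd'], -1): A returns 'a', B raises TypeError
-- crash fix: A raises KeyError at the last seat of every doubling round, i.e. whenever r = len(names)*(2**k - 1) with k >= 1 (e.g. (['A','B','C'], 3)); there B returns the intended drinker, the last name of that round ('C'). — e.g. on whoIsNext(["A", "B", "C"], 3): A raises KeyError, B returns "C"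
import Mathlib
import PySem

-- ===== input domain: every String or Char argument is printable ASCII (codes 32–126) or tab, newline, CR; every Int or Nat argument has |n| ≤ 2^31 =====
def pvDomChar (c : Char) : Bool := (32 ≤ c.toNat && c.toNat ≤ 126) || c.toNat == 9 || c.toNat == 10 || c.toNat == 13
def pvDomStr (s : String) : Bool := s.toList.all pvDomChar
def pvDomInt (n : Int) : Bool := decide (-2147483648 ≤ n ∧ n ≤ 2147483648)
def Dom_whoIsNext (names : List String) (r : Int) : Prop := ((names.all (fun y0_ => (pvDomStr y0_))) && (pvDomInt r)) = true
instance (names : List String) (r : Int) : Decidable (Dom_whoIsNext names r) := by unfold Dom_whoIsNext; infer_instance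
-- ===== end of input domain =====

-- B: loop-free closed form via bit_length instead of A's reverse-dict passes + geometric-series search loop (faster in a timing run; return value only).


-- ===== PORT A =====
-- A's while-loop; fuel r.toNat + 2 suffices for every input admitted by Pre_ (guard for totality only).
-- seq_sum update is a * (q ** mul - 1) // (q - 1) with q = 2; Python's '//' is PySem.Int.floordiv.
def whoIsNextLoop (a r mul seq_sum : Int) : Nat → Int × Int
  | 0 => (mul, seq_sum)
  | fuel + 1 =>
      if seq_sum ≤ r then
        whoIsNextLoop a r (mul + 1) (PySem.Int.floordiv (a * (2 ^ (mul + 1).toNat - 1)) (2 - 1)) fuel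
      else (mul, seq_sum)

-- Python's '2 ** mul' after the loop has mul ≥ 0 on every input Pre_ admits; '.toNat' models that case
-- exactly (the float path 2**-1 that Python takes for r < 0 lies outside Pre_ and is not modelled).
def whoIsNext (names : List String) (r : Int) : String :=
  let name_dict : PySem.Dict Int String := PySem.Dict.mk (PySem.List.enumerate names 0)
  let reverse_dict : PySem.Dict String Int :=
    name_dict.items.foldl (fun d kv => d.insert kv.2 kv.1) PySem.Dict.empty
  let queue : List Int := names.map (fun name => (reverse_dict.get? name).getD 0)
  let a : Int := (queue.length : Int)
  let res := whoIsNextLoop a r 0 0 (r.toNat + 2)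
  let mul := res.1 - 1
  let seq_sum := res.2 - a * 2 ^ mul.toNat
  let residue := r - seq_sum - 1
  ((name_dict.get? (PySem.Int.floordiv residue (2 ^ mul.toNat))).getD "")

-- ===== PORT B =====
-- Python's '2 ** m' has m ≥ 0 on every input Pre_ admits; '.toNat' models that case exactly
-- (the float path Python takes for r ≤ 0 lies outside Pre_ and is not modelled).
def whoIsNext_alt (names : List String) (r : Int) : String :=
  let n : Int := (names.length : Int)
  let m : Int := (PySem.Int.bitLength (PySem.Int.floordiv (r - 1) n + 1) : Int) - 1
  (PySem.List.pyGet? names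
      (PySem.Int.floordiv (r - 1 - n * (2 ^ m.toNat - 1)) (2 ^ m.toNat))).getD ""

-- ===== PRECONDITION & SPEC =====
-- Pre_ excludes: empty names (A loops forever); non-positive r, where A usually raises KeyError and its
-- occasional value (e.g. (["a","b","c","d"], -1) ↦ "a") is an accident of float 2**-1 arithmetic hitting an
-- integer dict key; and the round boundaries r = len(names)*(2^k - 1), k ≥ 1, where A raises KeyError
-- (the bound k < 34 covers every such r with |r| ≤ 2^31, i.e. every r in Dom_).
def Pre_whoIsNext (names : List String) (r : Int) : Prop :=
  names ≠ [] ∧ 1 ≤ r ∧ ∀ k : Nat, k < 34 → r ≠ (names.length : Int) * (2 ^ (k + 1) - 1)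
instance (names : List String) (r : Int) : Decidable (Pre_whoIsNext names r) := by
  unfold Pre_whoIsNext; infer_instance

def pvWitness_whoIsNext : List String × Int := (["Sheldon", "Penny"], 7)

-- A raises KeyError whenever r = len(names)*(2^k - 1) with k ≥ 1 (the last seat of a doubling round);
-- B returns the intended drinker there, the last name of that round.
def Raises_whoIsNext (names : List String) (r : Int) : Prop :=
  names ≠ [] ∧ 1 ≤ r ∧ ∃ k : Nat, k < 34 ∧ r = (names.length : Int) * (2 ^ (k + 1) - 1)
instance (names : List String) (r : Int) : Decidable (Raises_whoIsNext names r) := by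
  unfold Raises_whoIsNext; infer_instance
def pvRaiseWitness_whoIsNext : List String × Int := (["A", "B", "C"], 3)
def pvRaiseWitnessOut_whoIsNext : String := "C"

def Spec_whoIsNext (names : List String) (r : Int) (out : String) : Prop := out = whoIsNext_alt names r
instance (names : List String) (r : Int) (out : String) : Decidable (Spec_whoIsNext names r out) := by
  unfold Spec_whoIsNext; infer_instance

-- ===== CLAIM =====
def Claim_equal_whoIsNext : Prop := ∀ (names : List String) (r : Int), Dom_whoIsNext names r → Pre_whoIsNext names r → Spec_whoIsNext names r (whoIsNext names r)
def Claim_raises_whoIsNext : Prop := (∀ (names : List String) (r : Int), Dom_whoIsNext names r → Raises_whoIsNext names r → ¬ Pre_whoIsNext names r) ∧ (Dom_whoIsNext (pvRaiseWitness_whoIsNext.1) (pvRaiseWitness_whoIsNext.2) ∧ Raises_whoIsNext (pvRaiseWitness_whoIsNext.1) (pvRaiseWitness_whoIsNext.2) ∧ whoIsNext_alt (pvRaiseWitness_whoIsNext.1) (pvRaiseWitness_whoIsNext.2) = pvRaiseWitnessOut_whoIsNext)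

-- ===== LEMMAS AND PROOFS =====

lemma pv_floordiv_one (x : Int) : PySem.Int.floordiv x 1 = x := by
  rw [PySem.Int.floordiv_eq_ediv_of_pos (by norm_num)]; exact Int.ediv_one x

-- A's search loop, characterized: from the state after the first iteration, with enough fuel, it stops
-- at the unique round M with n*(2^M - 1) ≤ r < n*(2^(M+1) - 1).
lemma pv_loopA : ∀ (fuel m : Nat) (n r : Int), 0 < n →
    n * (2 ^ m - 1) ≤ r → r < n * (2 ^ (m + fuel) - 1) →
    ∃ M : Nat, m ≤ M ∧ n * (2 ^ M - 1) ≤ r ∧ r < n * (2 ^ (M + 1) - 1) ∧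
      whoIsNextLoop n r ((m : Int) + 1) (n * (2 ^ (m + 1) - 1)) fuel
        = ((M : Int) + 1, n * (2 ^ (M + 1) - 1)) := by
  intro fuel
  induction fuel with
  | zero =>
      intro m n r hn hlow hup
      simp only [Nat.add_zero] at hup
      omega
  | succ fuel ih =>
      intro m n r hn hlow hup
      by_cases hc : n * (2 ^ (m + 1) - 1) ≤ r
      · have hup' : r < n * (2 ^ (m + 1 + fuel) - 1) := by
          have : m + 1 + fuel = m + (fuel + 1) := by omega
          rw [this]; exact hup
        obtain ⟨M, hmM, hlowM, hupM, hA⟩ := ih (m + 1) n r hn hc hup'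
        refine ⟨M, by omega, hlowM, hupM, ?_⟩
        rw [whoIsNextLoop, if_pos hc]
        have h1 : ((m : Int) + 1 + 1).toNat = m + 2 := by omega
        have h2 : PySem.Int.floordiv (n * (2 ^ (m + 2) - 1)) (2 - 1)
            = n * (2 ^ ((m + 1) + 1) - 1) := by
          norm_num [pv_floordiv_one]
        rw [h1, h2]
        have h3 : ((m : Int) + 1 + 1) = ((m + 1 : Nat) : Int) + 1 := by push_cast; ring
        rw [h3]; exact hA
      · refine ⟨m, le_refl m, hlow, by omega, ?_⟩
        rw [whoIsNextLoop, if_neg hc]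

-- dict(enumerate(names, s)) looked up at key i, s ≤ i < s + len: the (i - s)-th name.
lemma pv_dict_enum : ∀ (names : List String) (s i : Int), s ≤ i → i < s + names.length →
    (PySem.Dict.mk (PySem.List.enumerate names s)).get? i = names[(i - s).toNat]? := by
  intro names
  induction names with
  | nil => intro s i h0 h1; simp at h1; omega
  | cons x xs ih =>
      intro s i h0 h1
      rw [PySem.List.enumerate_cons, PySem.Dict.get?_mk_cons]
      by_cases hs : s = i
      · simp [hs]
      · have hbeq : (s == i) = false := by simp [hs]
        rw [hbeq]
        simp only [Bool.false_eq_true, if_false]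
        have h1' : i < s + 1 + (xs.length : Int) := by
          simp only [List.length_cons] at h1; push_cast at h1 ⊢; omega
        rw [ih (s + 1) i (by omega) h1']
        have ht : (i - s).toNat = (i - (s + 1)).toNat + 1 := by omega
        rw [ht]
        simp

-- B's round index: for r in round M (n*(2^M-1) ≤ r < n*(2^(M+1)-1), boundaries excluded),
-- bit_length((r-1)//n + 1) = M + 1.
lemma pv_round_eq (n r : Int) (M : Nat) (hn : 0 < n)
    (hneq : ∀ j : Nat, r ≠ n * (2 ^ (j + 1) - 1)) (hr1 : 1 ≤ r)
    (hlow : n * (2 ^ M - 1) ≤ r) (hup : r < n * (2 ^ (M + 1) - 1)) :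
    PySem.Int.bitLength (PySem.Int.floordiv (r - 1) n + 1) = M + 1 := by
  rw [PySem.Int.floordiv_eq_ediv_of_pos hn]
  obtain ⟨q, hqe⟩ : ∃ q, (r - 1) / n = q := ⟨_, rfl⟩
  rw [hqe]
  have hmod0 := Int.emod_nonneg (r - 1) (by omega : n ≠ 0)
  have hmodU := Int.emod_lt_of_pos (r - 1) hn
  have hdm : n * q + (r - 1) % n = r - 1 := by rw [← hqe]; exact Int.mul_ediv_add_emod (r - 1) n
  have hql : q * n ≤ r - 1 := by nlinarith
  have hqu : r - 1 < (q + 1) * n := by nlinarith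
  have hq0 : 0 ≤ q := by nlinarith
  obtain ⟨b, hbe⟩ : ∃ b, PySem.Int.bitLength (q + 1) = b := ⟨_, rfl⟩
  have hbu : (q + 1).natAbs < 2 ^ b := by rw [← hbe]; exact PySem.Int.lt_two_pow_bitLength (q + 1)
  have hbl : 2 ^ (b - 1) ≤ (q + 1).natAbs := by
    rw [← hbe]; exact PySem.Int.two_pow_bitLength_le (q + 1) (by omega)
  have hbpos : 1 ≤ b := by
    by_contra h
    have hb0 : b = 0 := by omega
    rw [hb0] at hbu
    have : (q + 1).natAbs = 0 := by omega
    omega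
  have hnatAbs : ((q + 1).natAbs : Int) = q + 1 := Int.natAbs_of_nonneg (by omega)
  have hbuI : q + 1 < (2 : Int) ^ b := by rw [← hnatAbs]; exact_mod_cast hbu
  have hblI : (2 : Int) ^ (b - 1) ≤ q + 1 := by rw [← hnatAbs]; exact_mod_cast hbl
  have hBl : n * (2 ^ (b - 1) - 1) ≤ r - 1 := by nlinarith
  have hBu : r ≤ n * (2 ^ b - 1) := by nlinarith
  rw [hbe]
  -- show b = M + 1 by the sandwich
  by_contra hne'
  rcases Nat.lt_or_ge b (M + 1) with h | h
  · -- b ≤ M: r ≤ n*(2^b - 1) ≤ n*(2^M - 1) ≤ r forces the boundary r = n*(2^b - 1), b ≥ 1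
    have hmono : (2 : Int) ^ b ≤ 2 ^ M := by
      apply pow_le_pow_right₀ (by norm_num) (by omega)
    have hreq : r = n * (2 ^ ((b - 1) + 1) - 1) := by
      have hbb : (b - 1) + 1 = b := by omega
      rw [hbb]; nlinarith
    exact hneq (b - 1) hreq
  · -- M + 2 ≤ b: n*(2^(b-1) - 1) ≤ r - 1 but r < n*(2^(M+1) - 1) ≤ n*(2^(b-1) - 1)
    have hM' : M + 1 ≤ b - 1 := by omega
    have hmono : (2 : Int) ^ (M + 1) ≤ 2 ^ (b - 1) := by
      apply pow_le_pow_right₀ (by norm_num) hM'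
    nlinarith

-- the final seat index lies in [0, n)
lemma pv_idx_bounds (n r : Int) (M : Nat) (hn : 0 < n)
    (hlowS : n * (2 ^ M - 1) < r) (hup : r < n * (2 ^ (M + 1) - 1)) :
    0 ≤ PySem.Int.floordiv (r - 1 - n * (2 ^ M - 1)) (2 ^ M) ∧
      PySem.Int.floordiv (r - 1 - n * (2 ^ M - 1)) (2 ^ M) < n := by
  have hpow : (0 : Int) < 2 ^ M := by positivity
  rw [PySem.Int.floordiv_eq_ediv_of_pos hpow]
  have hres0 : 0 ≤ r - 1 - n * (2 ^ M - 1) := by omega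
  have hresU : r - 1 - n * (2 ^ M - 1) < n * 2 ^ M := by
    have h2 : (2 : Int) ^ (M + 1) = 2 * 2 ^ M := by ring
    nlinarith
  constructor
  · exact Int.ediv_nonneg hres0 (by omega)
  · by_contra h
    push Not at h
    have h1 := mul_le_mul_of_nonneg_right h (le_of_lt hpow)
    have h2 : (r - 1 - n * (2 ^ M - 1)) / (2 ^ M) * 2 ^ M ≤ r - 1 - n * (2 ^ M - 1) :=
      Int.ediv_mul_le _ (by omega)
    linarith

-- ===== VERDICT =====
theorem whoIsNext_spec : Claim_equal_whoIsNext := by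
  intro names r hdom hpre
  obtain ⟨hne, hr1, hbd⟩ := hpre
  unfold Spec_whoIsNext
  have hn : 0 < (names.length : Int) := by
    have := List.length_pos_iff.mpr hne
    exact_mod_cast this
  have hr31 : r ≤ 2147483648 := by
    simp [Dom_whoIsNext, pvDomInt] at hdom
    omega
  -- boundary exclusion extended to all j (large j is impossible within Dom)
  have hneq : ∀ j : Nat, r ≠ (names.length : Int) * (2 ^ (j + 1) - 1) := by
    intro j
    by_cases hj : j < 34
    · exact hbd j hj
    · intro heq
      have h2 : (2 : Int) ^ 35 ≤ 2 ^ (j + 1) := by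
        apply pow_le_pow_right₀ (by norm_num) (by omega)
      have h3 : (2 : Int) ^ 35 - 1 ≤ (names.length : Int) * (2 ^ (j + 1) - 1) := by nlinarith
      rw [← heq] at h3
      norm_num at h3
      omega
  -- A's loop: peel the first iteration, then apply pv_loopA
  have hstep : whoIsNextLoop (names.length : Int) r 0 0 (r.toNat + 2)
      = whoIsNextLoop (names.length : Int) r 1 ((names.length : Int) * (2 ^ 1 - 1)) (r.toNat + 1) := by
    have h22 : r.toNat + 2 = (r.toNat + 1) + 1 := rfl
    rw [h22, whoIsNextLoop, if_pos (by omega : (0 : Int) ≤ r)]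
    norm_num [pv_floordiv_one]
  have hfuel : r < (names.length : Int) * (2 ^ (0 + (r.toNat + 1)) - 1) := by
    have h1 : (r.toNat : Int) < 2 ^ r.toNat := by exact_mod_cast Nat.lt_two_pow_self
    have h2 : (2 : Int) ^ r.toNat ≤ 2 ^ (r.toNat + 1) - 1 := by
      have : (1 : Int) ≤ 2 ^ r.toNat := one_le_pow₀ (by norm_num)
      have he : (2 : Int) ^ (r.toNat + 1) = 2 * 2 ^ r.toNat := by ring
      omega
    have h3 : (2 : Int) ^ (r.toNat + 1) - 1 ≤ (names.length : Int) * (2 ^ (r.toNat + 1) - 1) := by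
      nlinarith [one_le_pow₀ (show (1:Int) ≤ 2 by norm_num) (n := r.toNat + 1)]
    simp only [Nat.zero_add]
    omega
  obtain ⟨M, _, hlowM, hupM, hA⟩ :=
    pv_loopA (r.toNat + 1) 0 (names.length : Int) r hn (by norm_num; omega) hfuel
  norm_num at hA
  -- strict lower bound: r = n*(2^M - 1) is a boundary (M ≥ 1) or r = 0 (M = 0)
  have hlowS : (names.length : Int) * (2 ^ M - 1) < r := by
    rcases lt_or_eq_of_le hlowM with h | h
    · exact h
    · exfalso
      cases M with
      | zero => norm_num at h; omega
      | succ M' => exact hneq M' h.symm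
  -- unfold both ports and compare
  simp only [whoIsNext, whoIsNext_alt, List.length_map]
  rw [hstep]
  rw [show ((names.length : Int) * (2 ^ 1 - 1)) = (names.length : Int) by norm_num]
  rw [hA]
  have hMt : (((M : Int) + 1 - 1)).toNat = M := by omega
  simp only [hMt]
  rw [pv_round_eq (names.length : Int) r M hn hneq hr1 hlowM hupM]
  have hMt2 : ((((M + 1 : Nat) : Int)) - 1).toNat = M := by omega
  rw [hMt2]
  have hAexpr : r - ((names.length : Int) * (2 ^ (M + 1) - 1) - (names.length : Int) * 2 ^ M) - 1
      = r - 1 - (names.length : Int) * (2 ^ M - 1) := by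
    have h2 : (2 : Int) ^ (M + 1) = 2 * 2 ^ M := by ring
    rw [h2]; ring
  rw [hAexpr]
  obtain ⟨hidx0, hidxU⟩ := pv_idx_bounds (names.length : Int) r M hn hlowS hupM
  rw [pv_dict_enum names 0
      (PySem.Int.floordiv (r - 1 - (names.length : Int) * (2 ^ M - 1)) (2 ^ M)) hidx0
      (by simpa using hidxU)]
  rw [PySem.List.pyGet?_of_nonneg (xs := names) hidx0]
  simp

@[simp] theorem whoIsNext_raises : Claim_raises_whoIsNext := by
  unfold Claim_raises_whoIsNext
  refine ⟨?_, by decide⟩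
  rintro names r _ ⟨hne, hr, k, hk, hb⟩ ⟨_, _, hall⟩
  exact hall k hk hb
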